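-- pv_equiv track=rewrite | github.com/mcthouacbb/Google-foobar | solution6.py | solution
-- ===== SOURCE A (Python) =====
-- def solution(x, y):
-- 	if x == y:
-- 		return "impossible"
-- 	x = int(x)
-- 	y = int(y)
-- 	count = 0
-- 	for i in range(200):
-- 		if x > y:
-- 			quo, rem = divmod(x, y)
-- 			if rem == 0:
-- 				if y == 1:
-- 					return str(count + quo - 1)
-- 				else:
-- 					return "impossible"
-- 			else:
-- 				x = rem
-- 				count += quo
-- 		elif y > x:
-- 			quo, rem = divmod(y, x)
-- 			if rem == 0:
-- 				if x == 1:
-- 					return str(count + quo - 1)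
-- 				else:
-- 					return "impossible"
-- 			else:
-- 				y = rem
-- 				count += quo
-- 		else:
-- 			return "impossible"
-- ===== SOURCE B (Python) =====
-- def _go(hi, lo, count, depth):
--     # invariant: hi > lo; one symmetric step of the Euclidean recurrence
--     if depth >= 200:
--         return None
--     quo, rem = divmod(hi, lo)
--     if rem == 0:
--         return str(count + quo - 1) if lo == 1 else "impossible"
--     return _go(lo, rem, count + quo, depth + 1)
--
--
-- def solution(x, y):
--     if x == y:
--         return "impossible"
--     a = int(x)
--     b = int(y)
--     if a == b:
--         return "impossible"
--     hi, lo = (a, b) if a > b else (b, a)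
--     return _go(hi, lo, 0, 0)
-- ===== Notes on version B (the rewrite author's own statement) =====
-- stated objective: simpler
-- what changed: A's 200-iteration loop with two mirrored x>y / y>x branches over the positional state (x, y) is replaced by a single recursive helper on the ordered state (hi, lo) that performs one symmetric Euclidean step per call, ordering the pair once up front.
-- outside the precondition, e.g. on solution('abc', '3'): A raises ValueError, B raises ValueError; on solution('0', '5'): A raises ZeroDivisionError, B raises ZeroDivisionError; on solution('5', '-3'): A returns None, B returns 'impossible'
import Mathlib
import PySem

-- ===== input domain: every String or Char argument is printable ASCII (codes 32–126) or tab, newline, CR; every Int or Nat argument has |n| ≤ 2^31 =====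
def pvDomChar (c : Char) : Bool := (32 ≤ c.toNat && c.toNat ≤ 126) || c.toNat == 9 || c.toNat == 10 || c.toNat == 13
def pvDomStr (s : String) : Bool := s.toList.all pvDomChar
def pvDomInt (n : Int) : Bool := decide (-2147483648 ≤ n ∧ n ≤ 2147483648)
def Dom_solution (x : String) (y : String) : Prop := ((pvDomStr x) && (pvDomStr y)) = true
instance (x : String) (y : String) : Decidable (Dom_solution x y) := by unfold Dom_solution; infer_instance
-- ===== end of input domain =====

-- B replaces A's positional two-branch loop by a single symmetric recursive step on the
-- ordered pair (hi, lo) — same values, a different decomposition (objective: simpler).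

-- ===== PORT A =====
-- A's for-loop over range(200): fuel-indexed recursion over the positional state (x, y, count).
-- none = the loop ran out (Python returns None); some "" = ZeroDivisionError (Python raises);
-- both only outside Pre_solution.
def loopA : Nat → Int → Int → Int → Option String
  | 0, _, _, _ => none
  | n + 1, x, y, count =>
    if x > y then
      match PySem.Int.divmod? x y with
      | none => some ""  -- ZeroDivisionError in Python; excluded by Pre_solution
      | some (quo, rem) =>
        if rem = 0 then
          if y = 1 then some (PySem.Int.toStr (count + quo - 1)) else some "impossible"
        else loopA n rem y (count + quo)
    else if y > x then
      match PySem.Int.divmod? y x with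
      | none => some ""  -- ZeroDivisionError in Python; excluded by Pre_solution
      | some (quo, rem) =>
        if rem = 0 then
          if x = 1 then some (PySem.Int.toStr (count + quo - 1)) else some "impossible"
        else loopA n x rem (count + quo)
    else some "impossible"

def solution (x : String) (y : String) : String :=
  if x = y then "impossible"
  else
    match PySem.Int.ofStr? x, PySem.Int.ofStr? y with
    | some a, some b => (loopA 200 a b 0).getD ""   -- getD "": Python returns None / raises only outside Pre_solution
    | _, _ => ""  -- int() ValueError in Python; excluded by Pre_solution

-- ===== PORT B =====
-- B's recursive helper _go on the ordered state (hi, lo): one symmetric Euclidean step.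
def go (hi : Int) (lo : Int) (count : Int) (depth : Nat) : Option String :=
  if 200 ≤ depth then none
  else
    match PySem.Int.divmod? hi lo with
    | none => some ""  -- ZeroDivisionError in Python; excluded by Pre_solution
    | some qr =>
      let quo := qr.1
      let rem := qr.2
      if rem = 0 then
        if lo = 1 then some (PySem.Int.toStr (count + quo - 1)) else some "impossible"
      else go lo rem (count + quo) (depth + 1)
termination_by 200 - depth
decreasing_by omega

def solution_alt (x : String) (y : String) : String :=
  if x = y then "impossible"
  else
    match PySem.Int.ofStr? x with
    | none => ""  -- int(x) ValueError in Python
    | some a =>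
      match PySem.Int.ofStr? y with
      | none => ""  -- int(y) ValueError in Python
      | some b =>
        if a = b then "impossible"
        else
          let p := if a > b then (a, b) else (b, a)
          (go p.1 p.2 0 0).getD ""

-- ===== PRECONDITION & SPEC =====
-- Pre_ admits equal strings (A answers "impossible" before parsing) and the task's natural
-- domain, both strings parsing as POSITIVE ints. Excluded: unequal non-int strings (Python
-- int() raises ValueError), a zero argument (divmod raises ZeroDivisionError), and unequal
-- nonpositive ints, on which A's behaviour is accidental (the loop can run out its 200
-- iterations and A returns None, no value of the declared type).
def Pre_solution (x : String) (y : String) : Prop :=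
  x = y ∨ (0 < (PySem.Int.ofStr? x).getD 0 ∧ 0 < (PySem.Int.ofStr? y).getD 0)
instance (x : String) (y : String) : Decidable (Pre_solution x y) := by
  unfold Pre_solution; infer_instance

def pvWitness_solution : String × String := ("10", "4")

def Spec_solution (x : String) (y : String) (out : String) : Prop := out = solution_alt x y
instance (x : String) (y : String) (out : String) : Decidable (Spec_solution x y out) := by
  unfold Spec_solution; infer_instance

-- ===== CLAIM (what is proved, stated in full; the proofs are below) =====
def Claim_equal_solution : Prop :=
  ∀ (x : String) (y : String), Dom_solution x y → Pre_solution x y →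
    Spec_solution x y (solution x y)

-- ===== LEMMAS AND PROOFS =====

-- A's positional loop equals B's ordered-step recursion, in both argument orders,
-- as long as the state is positive and strictly ordered.
lemma loopA_eq_go :
    ∀ (n depth : Nat), depth + n = 200 →
      ∀ (hi lo count : Int), 0 < lo → lo < hi →
        loopA n hi lo count = go hi lo count depth ∧
        loopA n lo hi count = go hi lo count depth := by
  intro n
  induction n with
  | zero =>
    intro depth hd hi lo count hlo hlt
    have : depth = 200 := by omega
    subst this
    constructor <;> simp [loopA, go]
  | succ n ih =>
    intro depth hd hi lo count hlo hlt
    have hdep : ¬ (200 ≤ depth) := by omega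
    have hlo0 : lo ≠ 0 := by omega
    have hdm : PySem.Int.divmod? hi lo =
        some (PySem.Int.floordiv hi lo, PySem.Int.mod hi lo) := by
      simp [PySem.Int.divmod?, PySem.Int.floordiv, PySem.Int.mod, hlo0]
    have hremlt : PySem.Int.mod hi lo < lo := PySem.Int.mod_lt hi hlo
    have hremge : 0 ≤ PySem.Int.mod hi lo := PySem.Int.mod_nonneg hi hlo
    rw [go]
    simp only [hdep, if_false, hdm]
    constructor
    · -- loopA (n+1) hi lo count, with hi > lo
      rw [loopA]
      simp only [hlt, if_pos, hdm, gt_iff_lt]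
      by_cases hr : PySem.Int.mod hi lo = 0
      · simp [hr]
      · have hrpos : 0 < PySem.Int.mod hi lo := lt_of_le_of_ne hremge (Ne.symm hr)
        have := (ih (depth + 1) (by omega) lo (PySem.Int.mod hi lo)
          (count + PySem.Int.floordiv hi lo) hrpos hremlt).2
        simp [hr, this]
    · -- loopA (n+1) lo hi count, with hi > lo (second branch)
      rw [loopA]
      have hnlt : ¬ (lo > hi) := by omega
      simp only [hnlt, if_false, hlt, if_pos, hdm]
      by_cases hr : PySem.Int.mod hi lo = 0
      · simp [hr]
      · have hrpos : 0 < PySem.Int.mod hi lo := lt_of_le_of_ne hremge (Ne.symm hr)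
        have := (ih (depth + 1) (by omega) lo (PySem.Int.mod hi lo)
          (count + PySem.Int.floordiv hi lo) hrpos hremlt).1
        simp [hr, this]

-- ===== VERDICT (by name: the statement is the Claim_ definition above) =====
theorem solution_spec : Claim_equal_solution := by
  intro x y _ hpre
  unfold Spec_solution solution solution_alt
  by_cases hxy : x = y
  · simp [hxy]
  · simp only [hxy, if_false]
    have hp := hpre.resolve_left hxy
    have hx := hp.1
    have hy := hp.2
    obtain ⟨a, ha⟩ : ∃ a, PySem.Int.ofStr? x = some a := by
      cases h : PySem.Int.ofStr? x with
      | none => rw [h] at hx; simp at hx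
      | some a => exact ⟨a, rfl⟩
    obtain ⟨b, hb⟩ : ∃ b, PySem.Int.ofStr? y = some b := by
      cases h : PySem.Int.ofStr? y with
      | none => rw [h] at hy; simp at hy
      | some b => exact ⟨b, rfl⟩
    rw [ha] at hx; rw [hb] at hy
    simp only [Option.getD_some] at hx hy
    rw [ha, hb]
    simp only
    by_cases hab : a = b
    · subst hab
      rw [loopA]
      simp
    · simp only [hab, if_false]
      by_cases hgt : a > b
      · have h := (loopA_eq_go 200 0 rfl a b 0 hy hgt).1
        simp [hgt, h]
      · have hba : b > a := by omega
        have h := (loopA_eq_go 200 0 rfl b a 0 hx hba).2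
        simp [hgt, h]
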